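-- pv_equiv track=rewrite | github.com/tonghuikang/codecomp | 18G1-sample.py | solve
-- ===== SOURCE A (Python) =====
-- from collections import defaultdict
-- import bisect
--
-- def solve(nums):
--     nums = sorted(nums)
--     mp = defaultdict(list)
--     nonzeros = 0
--
--     for i in range(len(nums)):
--         mp[nums[i]].append(i)
--
--         if nums[i] != 0:
--             nonzeros += 1
--
--     res = 0
--     for i in range(len(nums)):
--         for j in range(i+1, len(nums)):
--             val = nums[i] * nums[j]
--             if val in mp:
--                 idx = bisect.bisect_right(mp[val], j)
--                 res += len(mp[val])-idx
--
--             if nums[i] == 0 and nums[j] == 0: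
--                 res+= nonzeros
--     return res
-- ===== SOURCE B (Python) =====
-- def solve(nums):
--     nums = sorted(nums)
--     n = len(nums)
--     nonzeros = sum(1 for x in nums if x != 0)
--     suffix = {}
--     res = 0
--     for j in range(n - 1, -1, -1):
--         vj = nums[j]
--         for i in range(j):
--             res += suffix.get(nums[i] * vj, 0)
--             if nums[i] == 0 and vj == 0:
--                 res += nonzeros
--         suffix[vj] = suffix.get(vj, 0) + 1
--     return res
-- ===== Notes on version B (the rewrite author's own statement) =====
-- stated objective: alternative
-- what changed: Replaces A's prebuilt value-to-sorted-index-list map plus per-pair binary search (bisect) with a single reversed outer loop that maintains an incremental suffix frequency dictionary, looking up nums[i]*nums[j] directly.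
import Mathlib
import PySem

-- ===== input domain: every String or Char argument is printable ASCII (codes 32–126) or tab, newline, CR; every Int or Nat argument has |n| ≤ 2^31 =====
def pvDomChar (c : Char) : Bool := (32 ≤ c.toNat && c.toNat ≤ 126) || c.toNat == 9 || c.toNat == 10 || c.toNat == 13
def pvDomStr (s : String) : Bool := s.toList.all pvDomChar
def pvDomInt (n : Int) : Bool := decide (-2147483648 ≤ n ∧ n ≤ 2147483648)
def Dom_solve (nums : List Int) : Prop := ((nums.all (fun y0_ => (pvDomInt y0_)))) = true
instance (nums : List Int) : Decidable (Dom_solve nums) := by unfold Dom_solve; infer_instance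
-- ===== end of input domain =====

-- B replaces A's prebuilt value→index-list map and per-pair bisect by one reversed pass
-- maintaining an incremental suffix frequency dictionary (alternative algorithmic decomposition).

-- ===== PORT A =====
-- first loop of A: builds mp (defaultdict(list) of indices per value) and nonzeros, together
def buildA (s : List Int) : PySem.Dict Int (List Int) × Int :=
  (PySem.List.pyRange 0 (s.length : Int)).foldl
    (fun st i =>
      (st.1.modify (PySem.List.pyGetD s i 0) [] (fun l => l ++ [i]),
       if PySem.List.pyGetD s i 0 ≠ 0 then st.2 + 1 else st.2))
    (PySem.Dict.empty, 0)

def innerA (s : List Int) (mp : PySem.Dict Int (List Int)) (nonzeros : Int) (i res : Int) : Int :=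
  (PySem.List.pyRange (i + 1) (s.length : Int)).foldl
    (fun res j =>
      let val := PySem.List.pyGetD s i 0 * PySem.List.pyGetD s j 0
      let res := if mp.contains val then
          res + (((mp.getD val []).length : Int) - (PySem.List.bisectRight (mp.getD val []) j : Int))
        else res
      if PySem.List.pyGetD s i 0 = 0 ∧ PySem.List.pyGetD s j 0 = 0 then res + nonzeros else res)
    res

def solve (nums : List Int) : Int :=
  let s := PySem.List.sorted nums (fun x => x)
  let st := buildA s
  (PySem.List.pyRange 0 (s.length : Int)).foldl (fun res i => innerA s st.1 st.2 i res) 0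

-- ===== PORT B =====
-- body of B's outer (descending) j-loop: inner i-loop plus the suffix-counter update
def stepB (s : List Int) (nonzeros : Int) (st : PySem.Dict Int Int × Int) (j : Int) :
    PySem.Dict Int Int × Int :=
  let vj := PySem.List.pyGetD s j 0
  let res := (PySem.List.pyRange 0 j).foldl
    (fun res i =>
      let res := res + st.1.getD (PySem.List.pyGetD s i 0 * vj) 0
      if PySem.List.pyGetD s i 0 = 0 ∧ vj = 0 then res + nonzeros else res)
    st.2
  (st.1.insert vj (st.1.getD vj 0 + 1), res)

def solve_alt (nums : List Int) : Int :=
  let s := PySem.List.sorted nums (fun x => x)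
  let nonzeros : Int := (s.countP (fun x => x ≠ 0) : Int)
  ((PySem.List.pyRange ((s.length : Int) - 1) (-1) (-1)).foldl (stepB s nonzeros)
    (PySem.Dict.empty, 0)).2

-- ===== PRECONDITION & SPEC =====
def Spec_solve (nums : List Int) (out : Int) : Prop := out = solve_alt nums
instance (nums : List Int) (out : Int) : Decidable (Spec_solve nums out) := by unfold Spec_solve; infer_instance

-- ===== CLAIM (what is proved, stated in full; the proofs are below) =====
def Claim_equal_solve : Prop := ∀ (nums : List Int), Dom_solve nums → Spec_solve nums (solve nums)

-- ===== LEMMAS AND PROOFS =====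

-- number of indices k with t ≤ k < len s and s[k] = v, as an Int
def cntC (s : List Int) (t v : Int) : Int :=
  ((PySem.List.pyRange t (s.length : Int)).countP
    (fun k => PySem.List.pyGetD s k 0 == v) : Int)

def termF (s : List Int) (i j : Int) : Int :=
  cntC s (j + 1) (PySem.List.pyGetD s i 0 * PySem.List.pyGetD s j 0) +
    (if PySem.List.pyGetD s i 0 = 0 ∧ PySem.List.pyGetD s j 0 = 0
      then (s.countP (fun x => x ≠ 0) : Int) else 0)

theorem buildA_split (s : List Int) :
    buildA s =
      ((PySem.List.pyRange 0 (s.length : Int)).foldl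
        (fun d i => d.modify (PySem.List.pyGetD s i 0) [] (fun l => l ++ [i]))
        PySem.Dict.empty,
       (PySem.List.pyRange 0 (s.length : Int)).foldl
        (fun a i => if PySem.List.pyGetD s i 0 ≠ 0 then a + 1 else a) 0) := by
  unfold buildA
  exact PySem.List.foldl_prod_mk
    (fun d i => d.modify (PySem.List.pyGetD s i 0) [] (fun l => l ++ [i]))
    (fun (a : Int) i => if PySem.List.pyGetD s i 0 ≠ 0 then a + 1 else a)
    (PySem.List.pyRange 0 (s.length : Int)) PySem.Dict.empty (0 : Int)

theorem buildA_snd (s : List Int) :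
    (buildA s).2 = (s.countP (fun x => x ≠ 0) : Int) := by
  rw [buildA_split]
  show (PySem.List.pyRange 0 (s.length : Int)).foldl
    (fun a i => if PySem.List.pyGetD s i 0 ≠ 0 then a + 1 else a) 0 = _
  rw [PySem.List.foldl_pyRange_zero_pyGetD' s 0 (fun acc v => if v ≠ 0 then acc + 1 else acc) 0]
  rw [PySem.List.foldl_ite_add_one]
  simp

theorem buildA_fst_getD (s : List Int) (v : Int) :
    (buildA s).1.getD v [] =
      (PySem.List.pyRange 0 (s.length : Int)).filter
        (fun k => PySem.List.pyGetD s k 0 == v) := by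
  rw [buildA_split]
  show ((PySem.List.pyRange 0 (s.length : Int)).foldl
      (fun d i => d.modify (PySem.List.pyGetD s i 0) [] (fun l => l ++ [i]))
      PySem.Dict.empty).getD v [] = _
  rw [show (PySem.List.pyRange 0 (s.length : Int)).foldl
      (fun d i => d.modify (PySem.List.pyGetD s i 0) [] (fun l => l ++ [i])) PySem.Dict.empty
    = ((PySem.List.pyRange 0 (s.length : Int)).map
        (fun i => (PySem.List.pyGetD s i 0, i))).foldl
      (fun d p => d.modify p.1 [] (fun l => l ++ [p.2])) PySem.Dict.empty by rw [List.foldl_map]]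
  rw [PySem.Dict.getD_foldl_modify_append]
  rw [List.filter_map]
  simp only [Function.comp_def, List.map_map]
  simp only [pysem, List.map_id']
  exact List.nil_append _

theorem bisectRight_eq_countP (l : List Int) (x : Int)
    (h : l.Pairwise (· ≤ ·)) :
    PySem.List.bisectRight l x = l.countP (fun a => a ≤ x) := by
  obtain ⟨hle, hlt, hgt⟩ := PySem.List.bisectRight_spec l x h
  set br := PySem.List.bisectRight l x with hbr
  have hsplit : l = l.take br ++ l.drop br := (List.take_append_drop br l).symm
  rw [show l.countP (fun a => decide (a ≤ x)) =
      (l.take br ++ l.drop br).countP (fun a => decide (a ≤ x)) from by rw [← hsplit]]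
  rw [List.countP_append]
  have h1 : (l.take br).countP (fun a => decide (a ≤ x)) = br := by
    rw [List.countP_eq_length.mpr, List.length_take, Nat.min_eq_left hle]
    intro a ha
    rw [List.mem_take_iff_getElem] at ha
    obtain ⟨i, hi, rfl⟩ := ha
    simpa using hlt i (by omega) (by omega)
  have h2 : (l.drop br).countP (fun a => decide (a ≤ x)) = 0 := by
    rw [List.countP_eq_zero]
    intro a ha
    rw [List.mem_drop_iff_getElem] at ha
    obtain ⟨i, hi, rfl⟩ := ha
    simpa using (hgt (br + i) (by omega) (by omega)).not_ge
  omega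

theorem filter_term_eq (s : List Int) (j v : Int) (h0 : 0 ≤ j)
    (hj : j < (s.length : Int)) :
    (((PySem.List.pyRange 0 (s.length : Int)).filter
        (fun k => PySem.List.pyGetD s k 0 == v)).length : Int) -
      (PySem.List.bisectRight
        ((PySem.List.pyRange 0 (s.length : Int)).filter
          (fun k => PySem.List.pyGetD s k 0 == v)) j : Int) =
      cntC s (j + 1) v := by
  set L := (PySem.List.pyRange 0 (s.length : Int)).filter
      (fun k => PySem.List.pyGetD s k 0 == v) with hL
  have hp : L.Pairwise (· ≤ ·) :=
    ((PySem.List.pairwise_lt_pyRange_one 0 (s.length : Int)).filter _).imp le_of_lt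
  rw [bisectRight_eq_countP L j hp]
  have hlen : L.length = L.countP (fun a => decide (a ≤ j)) + L.countP (fun a => decide ¬(a ≤ j)) := by
    simpa using @List.length_eq_countP_add_countP Int (fun a => decide (a ≤ j)) L
  have h2 : L.countP (fun a => decide ¬(a ≤ j)) =
      (PySem.List.pyRange (j + 1) (s.length : Int)).countP
        (fun k => PySem.List.pyGetD s k 0 == v) := by
    rw [hL, List.countP_filter]
    rw [PySem.List.pyRange_one_append 0 (j + 1) (s.length : Int) (by omega) (by omega),
      List.countP_append]
    have hz : (PySem.List.pyRange 0 (j + 1)).countP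
        (fun k => decide ¬(k ≤ j) && (PySem.List.pyGetD s k 0 == v)) = 0 := by
      rw [List.countP_eq_zero]
      intro a ha
      rw [PySem.List.mem_pyRange_one] at ha
      simp; omega
    rw [hz, Nat.zero_add]
    refine List.countP_congr ?_
    intro a ha
    rw [PySem.List.mem_pyRange_one] at ha
    simp; omega
  unfold cntC
  omega

theorem cntC_eq_zero_of_not_contains (s : List Int) (j v : Int)
    (h0 : 0 ≤ j)
    (hc : (buildA s).1.contains v = false) :
    cntC s (j + 1) v = 0 := by
  have hnone : (buildA s).1.get? v = none :=
    (PySem.Dict.get?_eq_none_iff_contains _ _).mpr hc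
  have hgd : (buildA s).1.getD v [] = [] := by
    simp [PySem.Dict.getD, hnone]
  rw [buildA_fst_getD] at hgd
  rw [List.filter_eq_nil_iff] at hgd
  unfold cntC
  rw [List.countP_eq_zero.mpr]
  · rfl
  · intro a ha
    rw [PySem.List.mem_pyRange_one] at ha
    exact hgd a (by rw [PySem.List.mem_pyRange_one]; omega)

theorem innerA_eq (s : List Int) (i res : Int) (hi : 0 ≤ i) :
    innerA s (buildA s).1 (buildA s).2 i res =
      res + ((PySem.List.pyRange (i + 1) (s.length : Int)).map (termF s i)).sum := by
  unfold innerA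
  refine (PySem.List.foldl_congr_mem _ _ (fun res j => res + termF s i j) res ?_).trans
    (PySem.List.foldl_add _ (termF s i) res)
  intro acc j hj
  rw [PySem.List.mem_pyRange_one] at hj
  dsimp only
  set vi := PySem.List.pyGetD s i 0
  set vj := PySem.List.pyGetD s j 0
  have key : (if (buildA s).1.contains (vi * vj) then
      acc + ((((buildA s).1.getD (vi * vj) []).length : Int) -
        (PySem.List.bisectRight ((buildA s).1.getD (vi * vj) []) j : Int))
      else acc) = acc + cntC s (j + 1) (vi * vj) := by
    by_cases hmc : (buildA s).1.contains (vi * vj)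
    · rw [if_pos hmc, buildA_fst_getD, filter_term_eq s j _ (by omega) (by omega)]
    · rw [if_neg hmc,
        cntC_eq_zero_of_not_contains s j _ (by omega) (Bool.eq_false_iff.mpr hmc), add_zero]
  rw [key, termF, buildA_snd]
  split_ifs <;> ring

theorem solve_eq_sum (nums : List Int) :
    solve nums =
      ((PySem.List.pyRange 0 ((PySem.List.sorted nums (fun x => x)).length : Int)).map
        (fun i => ((PySem.List.pyRange (i + 1)
            ((PySem.List.sorted nums (fun x => x)).length : Int)).map
          (termF (PySem.List.sorted nums (fun x => x)) i)).sum)).sum := by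
  unfold solve
  dsimp only
  set s := PySem.List.sorted nums (fun x => x) with hs
  refine (PySem.List.foldl_congr_mem _ _
      (fun res i => res + ((PySem.List.pyRange (i + 1) (s.length : Int)).map (termF s i)).sum)
      0 ?_).trans ?_
  · intro acc i hmem
    rw [PySem.List.mem_pyRange_one] at hmem
    exact innerA_eq s i acc hmem.1
  · rw [PySem.List.foldl_add
      (PySem.List.pyRange 0 (s.length : Int))
      (fun i => ((PySem.List.pyRange (i + 1) (s.length : Int)).map (termF s i)).sum) 0,
      zero_add]

theorem triangle_exchange_nat (g : Int → Int → Int) (m : Nat) :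
    ((PySem.List.pyRange 0 (m : Int)).map
        (fun i => ((PySem.List.pyRange (i + 1) (m : Int)).map (g i)).sum)).sum =
      ((PySem.List.pyRange 0 (m : Int)).map
        (fun j => ((PySem.List.pyRange 0 j).map (fun i => g i j)).sum)).sum := by
  induction m with
  | zero => simp [PySem.List.pyRange_one_eq_nil]
  | succ m ih =>
    have hcast : ((m + 1 : Nat) : Int) = (m : Int) + 1 := by push_cast; ring
    rw [hcast, PySem.List.pyRange_one_succ_right (Int.natCast_nonneg m),
      List.map_append, List.sum_append, List.map_append, List.sum_append]
    have hL : (PySem.List.pyRange 0 (m : Int)).map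
          (fun i => ((PySem.List.pyRange (i + 1) ((m : Int) + 1)).map (g i)).sum)
        = (PySem.List.pyRange 0 (m : Int)).map
          (fun i => ((PySem.List.pyRange (i + 1) (m : Int)).map (g i)).sum + g i m) := by
      apply List.map_congr_left
      intro i hi
      rw [PySem.List.mem_pyRange_one] at hi
      rw [PySem.List.pyRange_one_succ_right (show (i:Int) + 1 ≤ (m:Int) by omega),
        List.map_append, List.sum_append]
      simp
    rw [hL, PySem.List.sum_map_add_int, ih]
    have hsing : ([(m : Int)].map
        (fun i => ((PySem.List.pyRange (i + 1) ((m : Int) + 1)).map (g i)).sum)).sum = 0 := by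
      simp [PySem.List.pyRange_one_eq_nil]
    have hsing2 : ([(m : Int)].map
        (fun j => ((PySem.List.pyRange 0 j).map (fun i => g i j)).sum)).sum
        = ((PySem.List.pyRange 0 (m : Int)).map (fun i => g i m)).sum := by
      simp
    rw [hsing, hsing2, add_zero]

theorem triangle_exchange (n : Int) (g : Int → Int → Int) :
    ((PySem.List.pyRange 0 n).map
        (fun i => ((PySem.List.pyRange (i + 1) n).map (g i)).sum)).sum =
      ((PySem.List.pyRange 0 n).map
        (fun j => ((PySem.List.pyRange 0 j).map (fun i => g i j)).sum)).sum := by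
  by_cases hn : 0 ≤ n
  · have : n = ((n.toNat : Nat) : Int) := by omega
    rw [this]
    exact triangle_exchange_nat g n.toNat
  · rw [PySem.List.pyRange_one_eq_nil (by omega)]
    simp

theorem cntC_cons (s : List Int) (t v : Int) (h : t < (s.length : Int)) :
    cntC s t v = cntC s (t + 1) v +
      (if PySem.List.pyGetD s t 0 == v then 1 else 0) := by
  unfold cntC
  rw [PySem.List.pyRange_one_cons h, List.countP_cons]
  rcases hb : (PySem.List.pyGetD s t 0 == v) with _ | _ <;> simp_all

theorem loopB (s : List Int) : ∀ (k : Nat) (t : Int), 0 ≤ t →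
    t + (k : Int) = (s.length : Int) →
    (∀ v, (((PySem.List.pyRange t (s.length : Int)).reverse).foldl
        (stepB s (s.countP (fun x => x ≠ 0) : Int)) (PySem.Dict.empty, 0)).1.getD v 0 =
          (cntC s t v : Int)) ∧
    (((PySem.List.pyRange t (s.length : Int)).reverse).foldl
        (stepB s (s.countP (fun x => x ≠ 0) : Int)) (PySem.Dict.empty, 0)).2 =
      ((PySem.List.pyRange t (s.length : Int)).map
        (fun j => ((PySem.List.pyRange 0 j).map (fun i => termF s i j)).sum)).sum := by
  intro k
  induction k with
  | zero =>
    intro t ht heq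
    have ht' : t = (s.length : Int) := by push_cast at heq; omega
    subst ht'
    rw [PySem.List.pyRange_one_eq_nil le_rfl]
    constructor
    · intro v
      unfold cntC
      rw [PySem.List.pyRange_one_eq_nil le_rfl]
      simp [PySem.Dict.getD, PySem.Dict.get?, PySem.Dict.empty]
    · simp
  | succ k ih =>
    intro t ht heq
    have htlt : t < (s.length : Int) := by push_cast at heq; omega
    obtain ⟨ihd, ihr⟩ := ih (t + 1) (by omega) (by push_cast at heq ⊢; omega)
    rw [PySem.List.pyRange_one_cons htlt, List.reverse_cons, List.foldl_append]
    set prev := ((PySem.List.pyRange (t + 1) (s.length : Int)).reverse).foldl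
      (stepB s (s.countP (fun x => x ≠ 0) : Int)) (PySem.Dict.empty, 0) with hprev
    have hstep : (stepB s (s.countP (fun x => x ≠ 0) : Int) prev t) =
        (prev.1.insert (PySem.List.pyGetD s t 0) (prev.1.getD (PySem.List.pyGetD s t 0) 0 + 1),
         prev.2 + ((PySem.List.pyRange 0 t).map (fun i => termF s i t)).sum) := by
      unfold stepB
      dsimp only
      congr 1
      refine (PySem.List.foldl_congr_mem _ _ (fun res i => res + termF s i t) prev.2 ?_).trans
        (PySem.List.foldl_add _ (fun i => termF s i t) prev.2)
      intro acc i hi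
      rw [PySem.List.mem_pyRange_one] at hi
      dsimp only
      rw [ihd, termF]
      split_ifs <;> ring
    rw [List.foldl_cons, List.foldl_nil, hstep]
    constructor
    · intro v
      rw [PySem.Dict.getD_insert, cntC_cons s t v htlt]
      by_cases hv : v = PySem.List.pyGetD s t 0
      · rw [if_pos hv, ihd, hv]
        simp
      · rw [if_neg hv, ihd]
        have hb : (PySem.List.pyGetD s t 0 == v) = false := by simp [Ne.symm hv]
        rw [hb]
        simp
    · rw [List.map_cons, List.sum_cons, ihr]
      ring

theorem solve_alt_eq_sum (nums : List Int) :
    solve_alt nums =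
      ((PySem.List.pyRange 0 ((PySem.List.sorted nums (fun x => x)).length : Int)).map
        (fun j => ((PySem.List.pyRange 0 j).map
          (fun i => termF (PySem.List.sorted nums (fun x => x)) i j)).sum)).sum := by
  unfold solve_alt
  dsimp only
  set s := PySem.List.sorted nums (fun x => x) with hs
  rw [PySem.List.pyRange_neg_one_eq_reverse]
  rw [show (-1 : Int) + 1 = 0 from rfl,
    show ((s.length : Int) - 1) + 1 = (s.length : Int) by ring]
  exact (loopB s s.length 0 le_rfl (by ring)).2

-- ===== VERDICT (by name: the statement is the Claim_ definition above) =====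
theorem solve_spec : Claim_equal_solve := by
  intro nums _
  unfold Spec_solve
  rw [solve_eq_sum, solve_alt_eq_sum, triangle_exchange]
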